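-- pv_equiv track=rewrite | github.com/xhua167/IE4 | flaskweb/getData.py | ifMap
-- ===== SOURCE A (Python) =====
-- def ifMap(data):
--     map = 'yes'
--     if len(data) == 1 and data[0]['Type'] == 'hotlines':
--         map = 'no'
--     else:
--         typeList = []
--         for i in data:
--             typeList.append(i['Type'])
--         if len(set(typeList)) == 1 and typeList[0] == 'hotlines':
--             map = 'no'
--         else:
--             for i in data:
--                 if i['Type'] != 'hotlines':
--                     temp = i
--                     data.remove(i)
--                     data.insert(0,temp)
--                     break
--     return map
-- ===== SOURCE B (Python) =====
-- def ifMap(data):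
--     for idx, i in enumerate(data):
--         if i['Type'] != 'hotlines':
--             data.insert(0, data.pop(idx))
--             return 'yes'
--     return 'no' if data else 'yes'
-- ===== Notes on version B (the rewrite author's own statement) =====
-- stated objective: simpler
-- what changed: Single enumerate pass that returns 'yes' at the first non-hotlines element (relocating it with pop/insert), instead of A's typeList build + set() cardinality test + redundant len==1 special case + separate relocation scan.
import Mathlib
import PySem

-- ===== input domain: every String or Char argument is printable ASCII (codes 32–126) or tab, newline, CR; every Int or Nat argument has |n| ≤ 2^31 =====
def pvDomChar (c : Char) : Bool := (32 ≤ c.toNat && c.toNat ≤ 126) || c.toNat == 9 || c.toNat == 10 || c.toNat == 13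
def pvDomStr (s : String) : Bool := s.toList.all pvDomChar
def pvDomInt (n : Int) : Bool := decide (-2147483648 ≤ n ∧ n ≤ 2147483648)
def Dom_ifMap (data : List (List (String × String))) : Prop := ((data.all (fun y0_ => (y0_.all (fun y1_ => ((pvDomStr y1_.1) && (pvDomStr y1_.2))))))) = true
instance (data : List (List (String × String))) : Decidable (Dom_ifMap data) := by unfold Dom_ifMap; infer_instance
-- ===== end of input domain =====

-- B replaces A's typeList/set detection passes and len==1 special case by one early-return scan
-- (objective: simpler). Both A and B move the first non-'hotlines' dict to the front of `data`
-- in place identically; the equivalence proved here is about the RETURN value.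

-- i['Type'] on the association-list dict (first match); total form used under Pre_ifMap
def typeOf (i : List (String × String)) : String :=
  ((PySem.Dict.mk i).get? "Type").getD ""

-- ===== PORT A =====
def ifMap (data : List (List (String × String))) : String :=
  if data.length = 1 ∧ typeOf (data.headD []) = "hotlines" then "no"
  else
    let typeList := data.map typeOf
    if PySem.Set.len (PySem.Set.ofList typeList) = 1 ∧ typeList.headD "" = "hotlines" then "no"
    else
      -- A's final for-loop only mutates `data` (remove/insert) and never changes `map`
      "yes"

-- ===== PORT B =====
-- the enumerate loop: returns "yes" at the first non-'hotlines' element (the pop/insert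
-- mutation is a side effect on `data`, not part of the return value); falling off the end
-- yields `'no' if data else 'yes'`
def ifMapAltGo (l : List (List (String × String))) (nonempty : Bool) : String :=
  match l with
  | [] => if nonempty then "no" else "yes"
  | i :: rest => if typeOf i ≠ "hotlines" then "yes" else ifMapAltGo rest nonempty

def ifMap_alt (data : List (List (String × String))) : String :=
  ifMapAltGo data (!data.isEmpty)

-- ===== PRECONDITION & SPEC =====
-- Python raises KeyError when some dict lacks the key 'Type'; Pre_ excludes exactly those inputs.
def Pre_ifMap (data : List (List (String × String))) : Prop :=
  ∀ i ∈ data, (PySem.Dict.mk i).contains "Type" = true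
instance (data : List (List (String × String))) : Decidable (Pre_ifMap data) := by unfold Pre_ifMap; infer_instance

def pvWitness_ifMap : (List (List (String × String))) := [[("Type", "hotlines")], [("Type", "news")]]

def Spec_ifMap (data : List (List (String × String))) (out : String) : Prop := out = ifMap_alt data
instance (data : List (List (String × String))) (out : String) : Decidable (Spec_ifMap data out) := by unfold Spec_ifMap; infer_instance

-- ===== CLAIM (what is proved, stated in full; the proofs are below) =====
def Claim_equal_ifMap : Prop := ∀ (data : List (List (String × String))), Dom_ifMap data → Pre_ifMap data → Spec_ifMap data (ifMap data)

-- ===== LEMMAS AND PROOFS =====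

-- B's loop, characterised: "no" iff every Type is 'hotlines' and the original list was nonempty
theorem ifMapAltGo_eq (l : List (List (String × String))) (b : Bool) :
    ifMapAltGo l b =
      if l.all (fun i => typeOf i == "hotlines") then (if b then "no" else "yes") else "yes" := by
  induction l with
  | nil => simp [ifMapAltGo]
  | cons i rest ih =>
      by_cases h : typeOf i = "hotlines"
      · simp [ifMapAltGo, h, ih]
      · simp [ifMapAltGo, h]

theorem foldl_add_all_eq (a : String) (l : List String) (h : ∀ x ∈ l, x = a) :
    List.foldl PySem.Set.add [a] l = [a] := by
  induction l with
  | nil => rfl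
  | cons x r ih =>
      have hx : x = a := h x (List.mem_cons_self ..)
      have : PySem.Set.add [a] x = [a] := by
        subst hx; simp [PySem.Set.add, PySem.Set.contains]
      rw [List.foldl_cons, this]
      exact ih (fun y hy => h y (List.mem_cons_of_mem _ hy))

-- A's set test, characterised
theorem set_len_one_iff (l : List String) :
    (PySem.Set.len (PySem.Set.ofList l) = 1 ∧ l.headD "" = "hotlines") ↔
      (l ≠ [] ∧ ∀ x ∈ l, x = "hotlines") := by
  constructor
  · rintro ⟨hlen, hhead⟩
    cases l with
    | nil => simp [PySem.Set.len, PySem.Set.ofList] at hlen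
    | cons x r =>
        refine ⟨by simp, ?_⟩
        obtain ⟨y, hy⟩ : ∃ y, PySem.Set.ofList (x :: r) = [y] := by
          match h : PySem.Set.ofList (x :: r) with
          | [] => simp [PySem.Set.len, h] at hlen
          | [y] => exact ⟨y, rfl⟩
          | y :: z :: t =>
              exfalso
              simp [PySem.Set.len, h] at hlen
              omega
        intro w hw
        have hmem : w ∈ PySem.Set.ofList (x :: r) := (PySem.Set.mem_ofList ..).mpr hw
        have hxmem : x ∈ PySem.Set.ofList (x :: r) :=
          (PySem.Set.mem_ofList ..).mpr (List.mem_cons_self ..)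
        rw [hy] at hmem hxmem
        simp at hmem hxmem
        simp at hhead
        rw [hmem, ← hxmem, hhead]
  · rintro ⟨hne, hall⟩
    cases l with
    | nil => exact absurd rfl hne
    | cons x r =>
        have hx : x = "hotlines" := hall x (List.mem_cons_self ..)
        subst hx
        have hof : PySem.Set.ofList ("hotlines" :: r) = ["hotlines"] := by
          show List.foldl PySem.Set.add [] ("hotlines" :: r) = _
          rw [List.foldl_cons]
          exact foldl_add_all_eq _ r (fun y hy => hall y (List.mem_cons_of_mem _ hy))
        simp [PySem.Set.len, hof]

-- ===== VERDICT (by name: the statement is the Claim_ definition above) =====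
theorem ifMap_spec : Claim_equal_ifMap := by
  intro data _ _
  show ifMap data = ifMap_alt data
  unfold ifMap ifMap_alt
  rw [ifMapAltGo_eq]
  by_cases hall : ∀ i ∈ data, typeOf i = "hotlines"
  · cases data with
    | nil => rfl
    | cons d ds =>
        have hset : PySem.Set.len (PySem.Set.ofList ((d :: ds).map typeOf)) = 1 ∧
            ((d :: ds).map typeOf).headD "" = "hotlines" := by
          refine (set_len_one_iff _).mpr ⟨by simp, ?_⟩
          intro x hx
          obtain ⟨i, hi, rfl⟩ := List.mem_map.mp hx
          exact hall i hi
        have hb : (d :: ds).all (fun i => typeOf i == "hotlines") = true := by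
          simp only [List.all_eq_true, beq_iff_eq]; exact hall
        simp only [hb, List.isEmpty_cons, Bool.not_false, if_true]
        by_cases h1 : (d :: ds).length = 1 ∧ typeOf ((d :: ds).headD []) = "hotlines"
        · rw [if_pos h1]
        · rw [if_neg h1]
          show (if PySem.Set.len (PySem.Set.ofList ((d :: ds).map typeOf)) = 1 ∧
              ((d :: ds).map typeOf).headD "" = "hotlines" then "no" else "yes") = "no"
          rw [if_pos hset]
  · have hb : data.all (fun i => typeOf i == "hotlines") = false := by
      rcases not_forall.mp hall with ⟨i, hi⟩
      rcases Classical.not_imp.mp hi with ⟨hmem, hne⟩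
      simp only [List.all_eq_false]
      exact ⟨i, hmem, by simpa using hne⟩
    have hc1 : ¬ (data.length = 1 ∧ typeOf (data.headD []) = "hotlines") := by
      rintro ⟨hlen, hhead⟩
      apply hall
      cases data with
      | nil => simp at hlen
      | cons d ds =>
          cases ds with
          | nil => intro i hi; simp at hi; subst hi; simpa using hhead
          | cons e es => simp at hlen
    have hc2 : ¬ (PySem.Set.len (PySem.Set.ofList (data.map typeOf)) = 1 ∧
        (data.map typeOf).headD "" = "hotlines") := by
      intro h2
      obtain ⟨-, h⟩ := (set_len_one_iff _).mp h2
      apply hall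
      intro i hi
      exact h (typeOf i) (List.mem_map.mpr ⟨i, hi, rfl⟩)
    simp only [hb, Bool.false_eq_true, if_false]
    rw [if_neg hc1]
    show (if PySem.Set.len (PySem.Set.ofList (data.map typeOf)) = 1 ∧
        (data.map typeOf).headD "" = "hotlines" then "no" else "yes") = "yes"
    rw [if_neg hc2]
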